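-- pv_equiv track=rewrite | github.com/TaeseoungKim/Algorithm_Solution | 자바스크립트/프로그래머스/2019 KAKAO BLIND RECRUITMENT/무지의 먹방 라이브.py | solution
-- ===== SOURCE A (Python) =====
-- import heapq
--
-- def solution(food_times, k):
--     answer = -1
--     length = len(food_times)
--     board = []
--
--     for i in range(length):
--         heapq.heappush(board, (food_times[i], i+1))
--
--     food_num = length
--     previous = 0
--
--     while board:
--         time = (board[0][0]-previous)*food_num
--
--         if k >= time:
--             k -= time
--             previous, _ = heapq.heappop(board)
--             food_num -= 1
--         else:
--             idx = k % food_num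
--             board.sort(key=lambda x: x[1])
--             answer = board[idx][1]
--             break
--
--     return answer
-- ===== SOURCE B (Python) =====
-- def solution(food_times, k):
--     # Binary search on the threshold time v instead of simulating the rotation:
--     # S(v) = sum(min(t, v)) is the total seconds needed to eat every food down
--     # to level v; find the smallest v with S(v) > k, then the survivors are the
--     # foods with t >= v and the answer is picked by modular arithmetic.
--     n = len(food_times)
--     if n == 0:
--         return -1
--     total = sum(food_times)
--     if k >= total:
--         return -1
--
--     def spent(v):
--         return sum(t if t < v else v for t in food_times)
--
--     lo = min(min(food_times), k // n) - 1   # spent(lo) <= k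
--     hi = max(food_times)                    # spent(hi) = total > k
--     while lo + 1 < hi:
--         mid = (lo + hi) // 2
--         if spent(mid) > k:
--             hi = mid
--         else:
--             lo = mid
--     v = hi
--     rem = [i + 1 for i, t in enumerate(food_times) if t >= v]
--     return rem[(k - spent(v - 1)) % len(rem)]
-- ===== Notes on version B (the rewrite author's own statement) =====
-- stated objective: alternative
-- what changed: A simulates the rotation with a heap, popping foods one by one and subtracting elapsed time from k; B never simulates: it binary-searches the threshold level v with S(v) = sum(min(t,v)) > k >= S(v-1), takes the survivors t >= v in index order and picks the answer by modular arithmetic.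
import Mathlib
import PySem

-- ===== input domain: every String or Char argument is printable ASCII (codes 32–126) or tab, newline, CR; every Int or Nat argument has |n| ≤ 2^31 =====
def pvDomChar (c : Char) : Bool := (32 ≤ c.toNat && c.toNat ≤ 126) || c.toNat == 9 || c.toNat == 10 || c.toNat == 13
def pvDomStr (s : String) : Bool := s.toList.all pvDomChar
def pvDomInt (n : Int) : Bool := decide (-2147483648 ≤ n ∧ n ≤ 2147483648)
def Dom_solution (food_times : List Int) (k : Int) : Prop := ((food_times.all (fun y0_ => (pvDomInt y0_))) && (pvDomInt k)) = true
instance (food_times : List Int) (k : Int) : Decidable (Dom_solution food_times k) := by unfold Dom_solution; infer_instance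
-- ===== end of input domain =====

-- B replaces A's heap simulation by a binary search on the threshold level v
-- with S(v) = Σ min(t, v) (objective: alternative algorithm, similar cost).

-- ===== PORT A =====
-- Python tuple comparison (t, i) < (t', i') — lexicographic.
def pvD : Int × Int := (0, 0)

def pvLt (a b : Int × Int) : Bool := decide (a.1 < b.1 ∨ (a.1 = b.1 ∧ a.2 < b.2))

-- termination measures for the sift loops (cited by decreasing_by)
theorem pvParent_lt (s p : Nat) (h : s < p) : (p - 1) / 2 < p := by omega

-- heapq._siftdown(heap, startpos, pos): bubble the new item up the parent chain.
def pvSiftdown (heap : List (Int × Int)) (startpos pos : Nat) (newitem : Int × Int) :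
    List (Int × Int) :=
  if h : startpos < pos then
    if pvLt newitem (heap.getD ((pos - 1) / 2) pvD) then
      pvSiftdown (heap.set pos (heap.getD ((pos - 1) / 2) pvD)) startpos ((pos - 1) / 2) newitem
    else heap.set pos newitem
  else heap.set pos newitem
termination_by pos
decreasing_by exact pvParent_lt startpos pos h

-- heapq._siftup's child selection: the right child when it exists and
-- `not heap[childpos] < heap[rightpos]`, else the left child.
def pvChild (heap : List (Int × Int)) (endpos pos : Nat) : Nat :=
  if 2 * pos + 2 < endpos && !(pvLt (heap.getD (2 * pos + 1) pvD) (heap.getD (2 * pos + 2) pvD))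
  then 2 * pos + 2 else 2 * pos + 1

theorem pvChild_measure (heap : List (Int × Int)) (e p : Nat) (h : 2 * p + 1 < e) :
    e - pvChild heap e p < e - p := by
  simp only [pvChild]; split <;> omega

-- heapq._siftup(heap, pos): walk down to a leaf along the selected child,
-- then the trailing _siftdown(heap, startpos, pos).
def pvSiftupLoop (heap : List (Int × Int)) (endpos startpos pos : Nat) (newitem : Int × Int) :
    List (Int × Int) :=
  if h : 2 * pos + 1 < endpos then
    pvSiftupLoop (heap.set pos (heap.getD (pvChild heap endpos pos) pvD)) endpos startpos
      (pvChild heap endpos pos) newitem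
  else pvSiftdown (heap.set pos newitem) startpos pos newitem
termination_by endpos - pos
decreasing_by exact pvChild_measure heap endpos pos h

-- heapq.heappush
def pvHeappush (heap : List (Int × Int)) (item : Int × Int) : List (Int × Int) :=
  pvSiftdown (heap ++ [item]) 0 heap.length item

-- heapq.heappop (never called on [] by A; the [] case is unreachable filler)
def pvHeappop (heap : List (Int × Int)) : (Int × Int) × List (Int × Int) :=
  let lastelt := heap.getLastD pvD
  let rest := heap.dropLast
  if rest.isEmpty then (lastelt, [])
  else (rest.getD 0 pvD, pvSiftupLoop (rest.set 0 lastelt) rest.length 0 0 lastelt)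

-- length lemmas: cited by pvLoopA's decreasing_by
theorem pvSiftdown_length (heap : List (Int × Int)) (s p : Nat) (n : Int × Int) :
    (pvSiftdown heap s p n).length = heap.length := by
  fun_induction pvSiftdown heap s p n <;> simp_all

theorem pvSiftupLoop_length (heap : List (Int × Int)) (e s p : Nat) (n : Int × Int) :
    (pvSiftupLoop heap e s p n).length = heap.length := by
  fun_induction pvSiftupLoop heap e s p n <;> simp_all [pvSiftdown_length]

theorem pvHeappop_length (a : Int × Int) (t : List (Int × Int)) :
    (pvHeappop (a :: t)).2.length = t.length := by
  unfold pvHeappop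
  by_cases ht : t = []
  · simp [ht]
  · have hd : ¬ (a :: t).dropLast = [] := by
      cases t with
      | nil => exact absurd rfl ht
      | cons b t' => simp
    simp only [List.isEmpty_iff]
    rw [if_neg hd]
    simp [pvSiftupLoop_length]

theorem pvHeappop_lt (a : Int × Int) (t : List (Int × Int)) :
    (pvHeappop (a :: t)).2.length < (a :: t).length := by
  rw [pvHeappop_length]; simp

-- A's while-loop
def pvLoopA : List (Int × Int) → Int → Int → Int → Int
  | [], _, _, _ => -1
  | top :: rest, k, previous, food_num =>
    let board := top :: rest
    let time := (top.1 - previous) * food_num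
    if k ≥ time then
      pvLoopA (pvHeappop board).2 (k - time) (pvHeappop board).1.1 (food_num - 1)
    else
      ((PySem.List.pyGet? (PySem.List.sorted board (fun x => x.2))
          (PySem.Int.mod k food_num)).getD pvD).2
termination_by board _ _ _ => board.length
decreasing_by exact pvHeappop_lt top rest

def solution (food_times : List Int) (k : Int) : Int :=
  let length := food_times.length
  let board := (List.range length).foldl
      (fun b i => pvHeappush b (food_times.getD i 0, (i : Int) + 1)) []
  pvLoopA board k 0 (length : Int)

-- ===== PORT B =====
-- spent(v) = sum(t if t < v else v for t in food_times)
def pvSpent (food_times : List Int) (v : Int) : Int :=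
  (food_times.map (fun t => if t < v then t else v)).sum

-- midpoint bounds: cited by pvBsearch's decreasing_by
theorem pvMid_bounds (lo hi : Int) (h : lo + 1 < hi) :
    lo < PySem.Int.floordiv (lo + hi) 2 ∧ PySem.Int.floordiv (lo + hi) 2 < hi := by
  constructor
  · have := (PySem.Int.le_floordiv_iff_mul_le (a := lo + hi) (b := 2) (q := lo + 1)
      (by omega)).mpr (by omega)
    omega
  · exact (PySem.Int.floordiv_lt_iff_lt_mul (a := lo + hi) (b := 2) (q := hi)
      (by omega)).mpr (by omega)

-- the while-loop of B: binary search for the smallest v with spent(v) > k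
def pvBsearch (food_times : List Int) (k lo hi : Int) : Int :=
  if h : lo + 1 < hi then
    let mid := PySem.Int.floordiv (lo + hi) 2
    if pvSpent food_times mid > k then pvBsearch food_times k lo mid
    else pvBsearch food_times k mid hi
  else hi
termination_by (hi - lo).toNat
decreasing_by
  · have := pvMid_bounds lo hi h; omega
  · have := pvMid_bounds lo hi h; omega

def solution_alt (food_times : List Int) (k : Int) : Int :=
  let n := food_times.length
  if n = 0 then -1
  else
    let total := food_times.sum
    if k ≥ total then -1
    else
      let lo := min ((PySem.List.min? food_times (fun t => t)).getD 0)
          (PySem.Int.floordiv k (n : Int)) - 1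
      let hi := (PySem.List.max? food_times (fun t => t)).getD 0
      let v := pvBsearch food_times k lo hi
      let rem := ((PySem.List.enumerate food_times).filter
          (fun p => decide (v ≤ p.2))).map (fun p => p.1 + 1)
      PySem.List.pyGetD rem
        (PySem.Int.mod (k - pvSpent food_times (v - 1)) (rem.length : Int)) 0

-- ===== PRECONDITION & SPEC =====
def Spec_solution (food_times : List Int) (k : Int) (out : Int) : Prop := out = solution_alt food_times k
instance (food_times : List Int) (k : Int) (out : Int) : Decidable (Spec_solution food_times k out) := by unfold Spec_solution; infer_instance

-- ===== CLAIM (what is proved, stated in full; the proofs are below) =====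
def Claim_equal_solution : Prop := ∀ (food_times : List Int) (k : Int), Dom_solution food_times k → Spec_solution food_times k (solution food_times k)

-- ===== LEMMAS AND PROOFS =====

-- order facts about pvLt
theorem pvLt_irrefl (a : Int × Int) : pvLt a a = false := by
  rcases a with ⟨a1, a2⟩
  simp only [pvLt, decide_eq_false_iff_not]
  omega

theorem pvLt_asymm {a b : Int × Int} (h : pvLt a b = true) : pvLt b a = false := by
  rcases a with ⟨a1, a2⟩; rcases b with ⟨b1, b2⟩
  simp [pvLt] at *; omega

theorem pvLe_trans {a b c : Int × Int} (h1 : pvLt b a = false) (h2 : pvLt c b = false) :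
    pvLt c a = false := by
  rcases a with ⟨a1, a2⟩; rcases b with ⟨b1, b2⟩; rcases c with ⟨c1, c2⟩
  simp [pvLt] at *; omega

theorem pvLt_le_trans {a b c : Int × Int} (h1 : pvLt a b = true) (h2 : pvLt c b = false) :
    pvLt c a = false := by
  rcases a with ⟨a1, a2⟩; rcases b with ⟨b1, b2⟩; rcases c with ⟨c1, c2⟩
  simp [pvLt] at *; omega

theorem pvLt_of_le_of_ne {a b : Int × Int} (h1 : pvLt b a = false) (h2 : a ≠ b) :
    pvLt a b = true := by
  rcases a with ⟨a1, a2⟩; rcases b with ⟨b1, b2⟩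
  simp [pvLt, Prod.mk.injEq] at *; omega

-- getD/set bookkeeping
theorem pvGetDSetNe (l : List (Int × Int)) (i j : Nat) (a : Int × Int) (hij : i ≠ j) :
    (l.set i a).getD j pvD = l.getD j pvD := by
  simp [List.getD_eq_getElem?_getD, List.getElem?_set_ne hij]

theorem pvGetDSetSelf (l : List (Int × Int)) (i : Nat) (a : Int × Int) (hi : i < l.length) :
    (l.set i a).getD i pvD = a := by
  rw [List.getD_eq_getElem _ _ (by simpa using hi)]
  exact List.getElem_set_self (by simpa using hi)

theorem pvSetGetDSelf (l : List (Int × Int)) (i : Nat) (hi : i < l.length) :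
    l.set i (l.getD i pvD) = l := by
  rw [List.getD_eq_getElem _ _ hi]
  exact List.set_getElem_self hi

-- the heap invariant
def pvHInv (h : List (Int × Int)) : Prop :=
  ∀ j, 0 < j → j < h.length → pvLt (h.getD j pvD) (h.getD ((j - 1) / 2) pvD) = false

theorem pvHInvNil : pvHInv [] := by
  intro j _ hj
  simp at hj

theorem pvRootMin {h : List (Int × Int)} (hinv : pvHInv h) :
    ∀ x ∈ h, pvLt x (h.getD 0 pvD) = false := by
  have key : ∀ j, j < h.length → pvLt (h.getD j pvD) (h.getD 0 pvD) = false := by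
    intro j
    induction j using Nat.strong_induction_on with
    | _ j ih =>
      intro hj
      rcases Nat.eq_zero_or_pos j with h0 | h0
      · subst h0; exact pvLt_irrefl _
      · exact pvLe_trans (ih ((j - 1) / 2) (by omega) (by omega)) (hinv j h0 hj)
  intro x hx
  rw [List.mem_iff_getElem] at hx
  obtain ⟨j, hj, rfl⟩ := hx
  rw [← List.getD_eq_getElem h pvD hj]
  exact key j hj

-- multiset bookkeeping for index writes
theorem pvSetSetPerm (l : List (Int × Int)) (i j : Nat) (n : Int × Int)
    (hij : i ≠ j) (hi : i < l.length) (hj : j < l.length) :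
    ((l.set i (l.getD j pvD)).set j n).Perm (l.set i n) := by
  rw [List.perm_iff_count]
  intro b
  have hj' : j < (l.set i (l.getD j pvD)).length := by simpa using hj
  rw [List.count_set hj', List.count_set hi, List.count_set hi]
  have hgj : (l.set i (l.getD j pvD))[j] = l[j] := List.getElem_set_ne hij _
  have hcount : l[i] ∈ l := List.getElem_mem hi
  have hcpos : (l[i] == b) = true → 1 ≤ List.count b l := by
    intro hb
    exact List.count_pos_iff.mpr (by rw [← eq_of_beq hb]; exact hcount)
  rw [hgj, List.getD_eq_getElem l pvD hj]
  by_cases h1 : l[i] == b <;> by_cases h2 : (l[j] : Int × Int) == b <;> by_cases h3 : n == b <;>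
    simp_all <;> omega

-- the written slot is never read before being overwritten
theorem pvSiftdown_set_self (heap : List (Int × Int)) (s p : Nat) (n : Int × Int) :
    pvSiftdown (heap.set p n) s p n = pvSiftdown heap s p n := by
  conv_lhs => rw [pvSiftdown.eq_def]
  conv_rhs => rw [pvSiftdown.eq_def]
  by_cases h : s < p
  · rw [dif_pos h, dif_pos h, pvGetDSetNe _ _ _ _ (by omega)]
    by_cases hlt : pvLt n (heap.getD ((p - 1) / 2) pvD) = true
    · rw [if_pos hlt, if_pos hlt, List.set_set]
    · rw [if_neg hlt, if_neg hlt, List.set_set]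
  · rw [dif_neg h, dif_neg h, List.set_set]

theorem pvChild_gt (heap : List (Int × Int)) (e p : Nat) : p < pvChild heap e p := by
  unfold pvChild; split <;> omega

theorem pvChild_lt (heap : List (Int × Int)) (e p : Nat) (h : 2 * p + 1 < e) :
    pvChild heap e p < e := by
  unfold pvChild
  split
  case isTrue hb => simp only [Bool.and_eq_true, decide_eq_true_eq] at hb; omega
  case isFalse hb => omega

theorem pvChild_cases (heap : List (Int × Int)) (e p : Nat) :
    pvChild heap e p = 2 * p + 1 ∨ pvChild heap e p = 2 * p + 2 := by
  unfold pvChild; split <;> omega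

theorem pvSiftdown_perm : ∀ (p : Nat) (heap : List (Int × Int)) (s : Nat) (n : Int × Int),
    p < heap.length → (pvSiftdown heap s p n).Perm (heap.set p n) := by
  intro p
  induction p using Nat.strong_induction_on with
  | _ p ih =>
    intro heap s n hp
    rw [pvSiftdown.eq_def]
    split
    case isTrue h =>
      split
      case isTrue hlt =>
        refine (ih ((p - 1) / 2) (by omega) _ _ _ (by simp; omega)).trans ?_
        exact pvSetSetPerm heap p ((p - 1) / 2) n (by omega) hp (by omega)
      case isFalse hlt => exact List.Perm.refl _
    case isFalse h => exact List.Perm.refl _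

theorem pvSiftupLoop_perm : ∀ (m : Nat) (heap : List (Int × Int)) (e s p : Nat) (n : Int × Int),
    e - p = m → e = heap.length → p < heap.length →
    (pvSiftupLoop heap e s p n).Perm (heap.set p n) := by
  intro m
  induction m using Nat.strong_induction_on with
  | _ m ih =>
    intro heap e s p n hm he hp
    rw [pvSiftupLoop.eq_def]
    split
    case isTrue h =>
      have hclt := pvChild_lt heap e p h
      have hcgt := pvChild_gt heap e p
      refine (ih (e - pvChild heap e p) (by omega) _ e s _ n rfl (by simp [he])
        (by simp; omega)).trans ?_
      exact pvSetSetPerm heap p (pvChild heap e p) n (by omega) hp (by omega)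
    case isFalse h =>
      exact (pvSiftdown_perm p (heap.set p n) s n (by simpa using hp)).trans
        (by rw [List.set_set])

theorem pvSiftdown_inv : ∀ (pos : Nat) (heap : List (Int × Int)) (n : Int × Int),
    pos < heap.length →
    heap.getD pos pvD = n →
    (∀ j, 0 < j → j < heap.length → j ≠ pos →
      pvLt (heap.getD j pvD) (heap.getD ((j - 1) / 2) pvD) = false) →
    (∀ c, c < heap.length → (c - 1) / 2 = pos → 0 < pos →
      pvLt (heap.getD c pvD) (heap.getD ((pos - 1) / 2) pvD) = false) →
    pvHInv (pvSiftdown heap 0 pos n) := by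
  intro pos
  induction pos using Nat.strong_induction_on with
  | _ pos ih =>
    intro heap n hp hv hIE hG
    rw [pvSiftdown.eq_def]
    split
    case isFalse h0 =>
      have hpos0 : pos = 0 := by omega
      subst hpos0
      rw [← hv, pvSetGetDSelf heap 0 hp]
      intro j hj0 hjl
      exact hIE j hj0 hjl (by omega)
    case isTrue h0 =>
      split
      case isFalse hnlt =>
        rw [← hv, pvSetGetDSelf heap pos hp]
        intro j hj0 hjl
        by_cases hjp : j = pos
        · subst hjp
          rw [hv]
          simpa using hnlt
        · exact hIE j hj0 hjl hjp
      case isTrue hlt =>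
        rw [← pvSiftdown_set_self]
        have hppl : (pos - 1) / 2 < heap.length := by omega
        have hppne : (pos - 1) / 2 ≠ pos := by omega
        -- values of the doubly-updated list
        have hgv : ∀ x, ((heap.set pos (heap.getD ((pos - 1) / 2) pvD)).set ((pos - 1) / 2) n).getD x pvD
            = if x = (pos - 1) / 2 then n
              else if x = pos then heap.getD ((pos - 1) / 2) pvD else heap.getD x pvD := by
          intro x
          by_cases h1 : x = (pos - 1) / 2
          · subst h1
            rw [pvGetDSetSelf _ _ _ (by simpa using hppl)]
            simp
          · rw [pvGetDSetNe _ _ _ _ (fun hh => h1 hh.symm)]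
            by_cases h2 : x = pos
            · subst h2
              rw [pvGetDSetSelf _ _ _ hp]
              simp [h1]
            · rw [pvGetDSetNe _ _ _ _ (fun hh => h2 hh.symm)]
              simp [h1, h2]
        apply ih ((pos - 1) / 2) (by omega)
        · simp; omega
        · rw [hgv]; simp
        · -- heap condition except the hole
          intro j hj0 hjl hjpp
          simp only [List.length_set] at hjl
          rw [hgv, hgv]
          by_cases hjpos : j = pos
          · have hpj : (j - 1) / 2 = (pos - 1) / 2 := by rw [hjpos]
            rw [if_neg hjpp, if_pos hjpos, if_pos hpj]
            exact pvLt_asymm hlt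
          · by_cases hpjpos : (j - 1) / 2 = pos
            · have hpjne : (j - 1) / 2 ≠ (pos - 1) / 2 := by omega
              rw [if_neg hjpp, if_neg hjpos, if_neg hpjne, if_pos hpjpos]
              exact hG j hjl hpjpos h0
            · by_cases hpjpp : (j - 1) / 2 = (pos - 1) / 2
              · rw [if_neg hjpp, if_neg hjpos, if_pos hpjpp]
                exact pvLt_le_trans hlt (by
                  have := hIE j hj0 hjl hjpos
                  rwa [hpjpp] at this)
              · rw [if_neg hjpp, if_neg hjpos, if_neg hpjpp, if_neg hpjpos]
                exact hIE j hj0 hjl hjpos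
        · -- grandparent condition at the new hole
          intro c hcl hcpp hpp0
          simp only [List.length_set] at hcl
          rw [hgv, hgv]
          have hcgt : (pos - 1) / 2 < c := by omega
          have hgpl : ((pos - 1) / 2 - 1) / 2 < heap.length := by omega
          have hgpne1 : ((pos - 1) / 2 - 1) / 2 ≠ (pos - 1) / 2 := by omega
          have hgpne2 : ((pos - 1) / 2 - 1) / 2 ≠ pos := by omega
          have hcnepp : c ≠ (pos - 1) / 2 := by omega
          by_cases hcpos : c = pos
          · rw [if_neg hcnepp, if_pos hcpos, if_neg hgpne1, if_neg hgpne2]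
            exact hIE ((pos - 1) / 2) hpp0 hppl hppne
          · rw [if_neg hcnepp, if_neg hcpos, if_neg hgpne1, if_neg hgpne2]
            have h1 : pvLt (heap.getD c pvD) (heap.getD ((pos - 1) / 2) pvD) = false := by
              have := hIE c (by omega) hcl hcpos
              rwa [hcpp] at this
            have h2 : pvLt (heap.getD ((pos - 1) / 2) pvD)
                (heap.getD (((pos - 1) / 2 - 1) / 2) pvD) = false :=
              hIE ((pos - 1) / 2) hpp0 hppl hppne
            exact pvLe_trans h2 h1

theorem pvChild_min (heap : List (Int × Int)) (e pos : Nat) :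
    ∀ j, 0 < j → j < e → (j - 1) / 2 = pos → j ≠ pvChild heap e pos →
      pvLt (heap.getD j pvD) (heap.getD (pvChild heap e pos) pvD) = false := by
  intro j hj0 hj hpj hne
  by_cases hb : (2 * pos + 2 < e &&
      !(pvLt (heap.getD (2 * pos + 1) pvD) (heap.getD (2 * pos + 2) pvD))) = true
  · rw [pvChild, if_pos hb] at hne ⊢
    simp only [Bool.and_eq_true, Bool.not_eq_true', decide_eq_true_eq] at hb
    have hj1 : j = 2 * pos + 1 := by omega
    rw [hj1]
    exact hb.2
  · rw [pvChild, if_neg hb] at hne ⊢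
    have hj2 : j = 2 * pos + 2 := by omega
    have hj2e : 2 * pos + 2 < e := by omega
    have hlt : pvLt (heap.getD (2 * pos + 1) pvD) (heap.getD (2 * pos + 2) pvD) = true := by
      cases hx : pvLt (heap.getD (2 * pos + 1) pvD) (heap.getD (2 * pos + 2) pvD)
      · exact absurd (by rw [hx]; simp [hj2e]) hb
      · rfl
    rw [hj2]
    exact pvLt_asymm hlt

theorem pvSiftupLoop_inv : ∀ (m : Nat) (heap : List (Int × Int)) (pos : Nat) (n : Int × Int),
    heap.length - pos = m → pos < heap.length →
    (∀ j, 0 < j → j < heap.length → j ≠ pos → (j - 1) / 2 ≠ pos →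
      pvLt ((heap.set pos n).getD j pvD) ((heap.set pos n).getD ((j - 1) / 2) pvD) = false) →
    (∀ c, c < heap.length → (c - 1) / 2 = pos → 0 < pos →
      pvLt ((heap.set pos n).getD c pvD) ((heap.set pos n).getD ((pos - 1) / 2) pvD) = false) →
    pvHInv (pvSiftupLoop heap heap.length 0 pos n) := by
  intro m
  induction m using Nat.strong_induction_on with
  | _ m ih =>
    intro heap pos n hm hp hD hG
    rw [pvSiftupLoop.eq_def]
    split
    case isFalse h =>
      apply pvSiftdown_inv pos (heap.set pos n) n (by simpa using hp)
      · exact pvGetDSetSelf heap pos n hp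
      · intro j hj0 hjl hjpos
        simp only [List.length_set] at hjl
        by_cases hpj : (j - 1) / 2 = pos
        · omega
        · exact hD j hj0 hjl hjpos hpj
      · intro c hcl hcpp hpos0
        simp only [List.length_set] at hcl
        omega
    case isTrue h =>
      set c := pvChild heap heap.length pos with hcdef
      have hcgt : pos < c := pvChild_gt heap heap.length pos
      have hclt : c < heap.length := pvChild_lt heap heap.length pos h
      have hcc : c = 2 * pos + 1 ∨ c = 2 * pos + 2 := pvChild_cases heap heap.length pos
      have hlen : heap.length = (heap.set pos (heap.getD c pvD)).length := by simp
      rw [hlen]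
      have hVpos : (heap.set pos n).getD pos pvD = n := pvGetDSetSelf heap pos n hp
      have hVx : ∀ x, x ≠ pos → (heap.set pos n).getD x pvD = heap.getD x pvD := by
        intro x hx
        exact pvGetDSetNe heap pos x n (fun hh => hx hh.symm)
      have hRc : ((heap.set pos (heap.getD c pvD)).set c n).getD c pvD = n :=
        pvGetDSetSelf _ c n (by simpa using hclt)
      have hRpos : ((heap.set pos (heap.getD c pvD)).set c n).getD pos pvD
          = heap.getD c pvD := by
        rw [pvGetDSetNe _ c pos n (by omega)]
        exact pvGetDSetSelf heap pos _ hp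
      have hRx : ∀ x, x ≠ c → x ≠ pos →
          ((heap.set pos (heap.getD c pvD)).set c n).getD x pvD = heap.getD x pvD := by
        intro x h1 h2
        rw [pvGetDSetNe _ c x n (fun hh => h1 hh.symm),
          pvGetDSetNe heap pos x _ (fun hh => h2 hh.symm)]
      apply ih (heap.length - c) (by omega) (heap.set pos (heap.getD c pvD)) c n (by simp)
        (by simp; omega)
      · intro j hj0 hjl hjc hpjc
        simp only [List.length_set] at hjl
        by_cases hjpos : j = pos
        · have hpj1 : (j - 1) / 2 ≠ c := hpjc
          have hpjlt : (j - 1) / 2 < pos := by omega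
          rw [hjpos, hRpos, hRx ((pos - 1) / 2) (by omega) (by omega)]
          have hg := hG c hclt (by omega) (by omega)
          rwa [hVx c (by omega), hVx ((pos - 1) / 2) (by omega)] at hg
        · by_cases hpjpos : (j - 1) / 2 = pos
          · rw [hRx j hjc hjpos, hpjpos, hRpos]
            exact pvChild_min heap heap.length pos j hj0 hjl hpjpos hjc
          · rw [hRx j hjc hjpos, hRx ((j - 1) / 2) hpjc hpjpos]
            have hd := hD j hj0 hjl hjpos hpjpos
            rwa [hVx j hjpos, hVx ((j - 1) / 2) hpjpos] at hd
      · intro d hdl hdc h0c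
        simp only [List.length_set] at hdl
        have hgp : (c - 1) / 2 = pos := by omega
        have hdgt : c < d := by omega
        rw [hRx d (by omega) (by omega), hgp, hRpos]
        have hd := hD d (by omega) hdl (by omega) (by omega)
        rwa [hVx d (by omega), hdc, hVx c (by omega)] at hd

theorem pvHeappush_perm (h : List (Int × Int)) (x : Int × Int) :
    (pvHeappush h x).Perm (x :: h) := by
  unfold pvHeappush
  have h1 := pvSiftdown_perm h.length (h ++ [x]) 0 x (by simp)
  have hlt : h.length < (h ++ [x]).length := by
    simp only [List.length_append, List.length_cons, List.length_nil]; omega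
  have h2 : (h ++ [x]).set h.length x = h ++ [x] := by
    have hx : (h ++ [x]).getD h.length pvD = x := by
      rw [List.getD_eq_getElem _ _ hlt]
      simp
    have h2 := pvSetGetDSelf (h ++ [x]) h.length hlt
    rwa [hx] at h2
  rw [h2] at h1
  exact h1.trans (List.perm_append_singleton x h)

theorem pvHeappush_inv {h : List (Int × Int)} (hinv : pvHInv h) (x : Int × Int) :
    pvHInv (pvHeappush h x) := by
  unfold pvHeappush
  apply pvSiftdown_inv h.length (h ++ [x]) x (by simp)
  · rw [List.getD_eq_getElem _ _ (by simp)]; simp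
  · intro j hj0 hjl hjne
    simp only [List.length_append, List.length_cons, List.length_nil] at hjl
    have hjlt : j < h.length := by omega
    rw [List.getD_append _ _ _ _ hjlt, List.getD_append _ _ _ _ (by omega)]
    exact hinv j hj0 hjlt
  · intro c hcl hcpp hpos
    simp only [List.length_append, List.length_cons, List.length_nil] at hcl
    omega

theorem pvDropLastGetLastD (l : List (Int × Int)) (h : l ≠ []) :
    l.dropLast ++ [l.getLastD pvD] = l := by
  have h2 : l.getLastD pvD = l.getLast h := by
    rw [List.getLastD_eq_getLast?, List.getLast?_eq_getLast h]
    rfl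
  rw [h2, List.dropLast_append_getLast]

theorem pvHeappop_fst (a : Int × Int) (t : List (Int × Int)) :
    (pvHeappop (a :: t)).1 = a := by
  unfold pvHeappop
  cases t with
  | nil => simp
  | cons b t' => simp

theorem pvHeappop_perm (a : Int × Int) (t : List (Int × Int)) :
    (pvHeappop (a :: t)).2.Perm t := by
  unfold pvHeappop
  cases t with
  | nil => simp
  | cons b t' =>
    have hd : ¬ (a :: b :: t').dropLast = [] := by simp
    simp only [List.isEmpty_iff]
    rw [if_neg hd]
    have hlen : 0 < (a :: b :: t').dropLast.length := by simp
    have hperm := pvSiftupLoop_perm ((a :: b :: t').dropLast.length - 0)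
      ((a :: b :: t').dropLast.set 0 ((a :: b :: t').getLastD pvD))
      (a :: b :: t').dropLast.length 0 0 ((a :: b :: t').getLastD pvD)
      rfl (by simp) (by simpa using hlen)
    refine hperm.trans ?_
    rw [List.set_set]
    have hd2 : (a :: b :: t').dropLast = a :: (b :: t').dropLast := by simp
    rw [hd2, List.set_cons_zero]
    have hlast : (a :: b :: t').getLastD pvD = (b :: t').getLastD pvD := List.getLastD_cons
    rw [hlast]
    have hsplit := pvDropLastGetLastD (b :: t') (by simp)
    have h3 := (List.perm_append_singleton ((b :: t').getLastD pvD) (b :: t').dropLast).symm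
    rwa [hsplit] at h3

theorem pvGetDDropLast (l : List (Int × Int)) (j : Nat) (hj : j < l.dropLast.length) :
    l.dropLast.getD j pvD = l.getD j pvD := by
  rw [List.getD_eq_getElem _ _ hj, List.getD_eq_getElem _ _ (by simp at hj ⊢; omega),
    List.getElem_dropLast]

theorem pvHeappop_inv {a : Int × Int} {t : List (Int × Int)} (hinv : pvHInv (a :: t)) :
    pvHInv (pvHeappop (a :: t)).2 := by
  unfold pvHeappop
  cases t with
  | nil => simpa using pvHInvNil
  | cons b t' =>
    have hd : ¬ (a :: b :: t').dropLast = [] := by simp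
    simp only [List.isEmpty_iff]
    rw [if_neg hd]
    have hlen : (a :: b :: t').dropLast.length
        = ((a :: b :: t').dropLast.set 0 ((a :: b :: t').getLastD pvD)).length := by simp
    rw [hlen]
    apply pvSiftupLoop_inv
      (((a :: b :: t').dropLast.set 0 ((a :: b :: t').getLastD pvD)).length - 0) _ 0
      ((a :: b :: t').getLastD pvD) rfl (by simp)
    · intro j hj0 hjl hj0' hpj0
      simp only [List.length_set, List.length_dropLast, List.length_cons] at hjl
      rw [List.set_set]
      rw [pvGetDSetNe _ 0 j _ (by omega), pvGetDSetNe _ 0 ((j - 1) / 2) _ (by omega)]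
      rw [pvGetDDropLast _ j (by simp; omega), pvGetDDropLast _ ((j - 1) / 2) (by simp; omega)]
      exact hinv j hj0 (by simp; omega)
    · intro cc hcc hcpj h0
      exact absurd h0 (lt_irrefl 0)

theorem pvBuild_perm (ps : List (Int × Int)) : ∀ (h : List (Int × Int)),
    (ps.foldl pvHeappush h).Perm (h ++ ps) := by
  induction ps with
  | nil => intro h; simp
  | cons x ps ih =>
    intro h
    simp only [List.foldl_cons]
    refine (ih (pvHeappush h x)).trans ?_
    refine (List.Perm.append_right ps (pvHeappush_perm h x)).trans ?_
    exact List.perm_middle.symm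

theorem pvBuild_inv (ps : List (Int × Int)) : ∀ {h : List (Int × Int)}, pvHInv h →
    pvHInv (ps.foldl pvHeappush h) := by
  induction ps with
  | nil => intro h hinv; simpa using hinv
  | cons x ps ih =>
    intro h hinv
    simp only [List.foldl_cons]
    exact ih (pvHeappush_inv hinv x)

-- insertion sort facts (for naming the strictly sorted arrangement)
theorem pvInsertBy_pairwise (x : Int × Int) (acc : List (Int × Int))
    (h : acc.Pairwise (fun a b => pvLt b a = false)) :
    (PySem.List.insertBy (fun a b => pvLt a b) x acc).Pairwise (fun a b => pvLt b a = false) := by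
  induction acc with
  | nil => simp [PySem.List.insertBy]
  | cons y ys ih =>
    rw [PySem.List.insertBy]
    by_cases hxy : pvLt x y = true
    · rw [if_pos hxy]
      refine List.pairwise_cons.mpr ⟨?_, h⟩
      intro z hz
      rcases List.mem_cons.mp hz with rfl | hz'
      · exact pvLt_asymm hxy
      · exact pvLt_le_trans hxy ((List.pairwise_cons.mp h).1 z hz')
    · rw [if_neg hxy]
      refine List.pairwise_cons.mpr ⟨?_, ih (List.pairwise_cons.mp h).2⟩
      intro z hz
      rcases (PySem.List.mem_insertBy _ _ _ _).mp hz with rfl | hz'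
      · simpa using hxy
      · exact (List.pairwise_cons.mp h).1 z hz'

theorem pvFoldlInsert_pairwise (xs : List (Int × Int)) : ∀ (acc : List (Int × Int)),
    acc.Pairwise (fun a b => pvLt b a = false) →
    (xs.foldl (fun acc x => PySem.List.insertBy (fun a b => pvLt a b) x acc) acc).Pairwise
      (fun a b => pvLt b a = false) := by
  induction xs with
  | nil => intro acc h; simpa using h
  | cons x xs ih =>
    intro acc h
    simp only [List.foldl_cons]
    exact ih _ (pvInsertBy_pairwise x acc h)

theorem pvSorted2_pairwise (xs : List (Int × Int)) :
    (PySem.List.sorted2 xs (fun x => x.1) (fun x => x.2)).Pairwise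
      (fun a b => pvLt b a = false) := by
  have hbe : (fun (a b : Int × Int) =>
      (decide (a.1 < b.1) || (!decide (b.1 < a.1) && decide (a.2 < b.2)))) =
      fun a b => pvLt a b := by
    funext a b
    rcases a with ⟨a1, a2⟩; rcases b with ⟨b1, b2⟩
    simp only [pvLt]
    rcases lt_trichotomy a1 b1 with h | h | h <;> simp [h] <;> omega
  unfold PySem.List.sorted2
  simp only [if_neg (by decide : ¬ (false = true))]
  rw [hbe]
  exact pvFoldlInsert_pairwise xs [] (by simp)

-- the pair list both sides build
def pvPairs : List Int → Nat → List (Int × Int)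
  | [], _ => []
  | a :: l, s => (a, (s : Int) + 1) :: pvPairs l (s + 1)

theorem pvPairs_enum (l : List Int) : ∀ (s : Nat),
    (PySem.List.enumerate l (s : Int)).map (fun p => (p.2, p.1 + 1)) = pvPairs l s := by
  induction l with
  | nil => intro s; simp [PySem.List.enumerate, pvPairs]
  | cons a l ih =>
    intro s
    rw [PySem.List.enumerate, pvPairs]
    simp only [List.map_cons]
    have : ((s : Int) + 1) = ((s + 1 : Nat) : Int) := by push_cast; ring
    rw [this, ih (s + 1)]

theorem pvPairs_range (l : List Int) :
    (List.range l.length).map (fun i => (l.getD i 0, (i : Int) + 1)) = pvPairs l 0 := by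
  suffices hgen : ∀ (L : List Int) (s : Nat) (l : List Int),
      (∀ j, j < l.length → L.getD (s + j) 0 = l.getD j 0) →
      (List.range' s l.length).map (fun i => (L.getD i 0, (i : Int) + 1)) = pvPairs l s by
    rw [List.range_eq_range']
    exact hgen l 0 l (by intro j hj; simp)
  intro L s l
  induction l generalizing s with
  | nil => intro _; simp [pvPairs]
  | cons a t ih =>
    intro hL
    rw [List.length_cons, List.range'_succ, pvPairs]
    simp only [List.map_cons]
    have h0 : L.getD s 0 = a := by
      have := hL 0 (by simp)
      simpa using this
    rw [h0]
    congr 1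
    exact ih (s + 1) (by
      intro j hj
      have := hL (j + 1) (by simpa using Nat.succ_lt_succ hj)
      simpa [Nat.add_comm, Nat.add_assoc, Nat.add_left_comm] using this)

theorem pvPairs_snd_lt (l : List Int) : ∀ (s : Nat),
    (pvPairs l s).Pairwise (fun a b => a.2 < b.2) := by
  have hmem : ∀ (l : List Int) (s : Nat) (z : Int × Int), z ∈ pvPairs l s → (s : Int) + 1 ≤ z.2 := by
    intro l
    induction l with
    | nil => intro s z hz; simp [pvPairs] at hz
    | cons a t ih =>
      intro s z hz
      rw [pvPairs] at hz
      rcases List.mem_cons.mp hz with rfl | hz'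
      · simp
      · have := ih (s + 1) z hz'
        push_cast at this ⊢
        omega
  induction l with
  | nil => intro s; simp [pvPairs]
  | cons a t ih =>
    intro s
    rw [pvPairs]
    refine List.pairwise_cons.mpr ⟨?_, ih (s + 1)⟩
    intro z hz
    have := hmem t (s + 1) z hz
    push_cast at this ⊢
    omega

theorem pvPairs_snd_nodup (l : List Int) (s : Nat) : ((pvPairs l s).map (fun x => x.2)).Nodup := by
  exact List.pairwise_map.mpr ((pvPairs_snd_lt l s).imp (fun h => ne_of_lt h))

theorem pvPairs_length (l : List Int) : ∀ (s : Nat), (pvPairs l s).length = l.length := by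
  induction l with
  | nil => intro s; simp [pvPairs]
  | cons a t ih => intro s; simp [pvPairs, ih]

theorem pvPairs_map_fst (l : List Int) : ∀ (s : Nat), (pvPairs l s).map (fun x => x.1) = l := by
  induction l with
  | nil => intro s; simp [pvPairs]
  | cons a t ih => intro s; simp [pvPairs, ih]

-- B's cursor-walk view of the simulation (proof helper): A's heap loop equals
-- this walk over any strictly pvLt-sorted arrangement of the same multiset.
def pvLoopC : List (Int × Int) → Int → Int → Int → Int
  | [], _, _, _ => -1
  | (t, i) :: rest, k, previous, food_num =>
    let time := (t - previous) * food_num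
    if k < time then
      ((PySem.List.pyGet? (PySem.List.sorted ((t, i) :: rest) (fun x => x.2))
          (PySem.Int.mod k food_num)).getD pvD).2
    else pvLoopC rest (k - time) t (food_num - 1)

theorem pvSim : ∀ (nn : Nat) (board s : List (Int × Int)) (k prev fn : Int),
    board.length = nn → pvHInv board → board.Perm s →
    s.Pairwise (fun a b => pvLt a b = true) → (s.map (fun x => x.2)).Nodup →
    pvLoopA board k prev fn = pvLoopC s k prev fn := by
  intro nn
  induction nn using Nat.strong_induction_on with
  | _ nn ih =>
    intro board s k prev fn hlen hinv hperm hpw hnd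
    cases board with
    | nil =>
      have hs : s = [] := List.eq_nil_of_length_eq_zero (by simpa using hperm.length_eq.symm)
      subst hs; simp [pvLoopA, pvLoopC]
    | cons b0 bt =>
      cases s with
      | nil => exact absurd hperm.length_eq (by simp)
      | cons s0 st =>
        have hb0 : b0 = s0 := by
          have hmin := pvRootMin hinv
          have hs0mem : s0 ∈ b0 :: bt := hperm.symm.subset (List.mem_cons_self)
          have hs0b : pvLt s0 b0 = false := by
            have := hmin s0 hs0mem
            simpa using this
          by_contra hne
          have hb0mem : b0 ∈ s0 :: st := hperm.subset (List.mem_cons_self)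
          rcases List.mem_cons.mp hb0mem with h | h
          · exact hne h
          · have hlt := (List.pairwise_cons.mp hpw).1 b0 h
            exact absurd hs0b (by simp [hlt])
        subst hb0
        rcases b0 with ⟨t0, i0⟩
        simp only [pvLoopA, pvLoopC]
        by_cases hk : (t0 - prev) * fn ≤ k
        · rw [if_pos hk, if_neg (not_lt.mpr hk), pvHeappop_fst]
          have hlen' : bt.length < nn := by
            simp only [List.length_cons] at hlen
            omega
          exact ih bt.length hlen' (pvHeappop ((t0, i0) :: bt)).2 st _ _ _
            (pvHeappop_length _ _) (pvHeappop_inv hinv)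
            ((pvHeappop_perm _ _).trans hperm.cons_inv)
            (List.pairwise_cons.mp hpw).2
            (by simpa using (List.nodup_cons.mp (by simpa using hnd)).2)
        · rw [if_neg hk, if_pos (not_le.mp hk)]
          have hsort : PySem.List.sorted ((t0, i0) :: bt) (fun x => x.2)
              = PySem.List.sorted ((t0, i0) :: st) (fun x => x.2) := by
            apply PySem.List.sorted_eq_of_perm_of_pairwise_lt
            · exact (PySem.List.sorted_perm ((t0, i0) :: st) (fun x => x.2) false).trans
                hperm.symm
            · have h1 := PySem.List.sorted_pairwise ((t0, i0) :: st) (fun x => x.2)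
              have hperm2 : (PySem.List.sorted ((t0, i0) :: st) (fun x => x.2)).Perm
                  ((t0, i0) :: st) := PySem.List.sorted_perm _ _ _
              have h2 : ((PySem.List.sorted ((t0, i0) :: st) (fun x => x.2)).map
                  (fun x => x.2)).Nodup := ((hperm2.map (fun x => x.2)).nodup_iff).mpr hnd
              have h3 : (PySem.List.sorted ((t0, i0) :: st) (fun x => x.2)).Pairwise
                  (fun a b => a.2 ≠ b.2) := List.pairwise_map.mp h2
              exact (h1.and h3).imp (fun hab => lt_of_le_of_ne hab.1 hab.2)
          rw [hsort]

-- S over a pair list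
def pvS (s : List (Int × Int)) (v : Int) : Int := (s.map (fun x => min x.1 v)).sum

-- lower bound of a sum by the minimum element
theorem pvSum_lb (s : List (Int × Int)) (c : Int) (h : ∀ x ∈ s, c ≤ x.1) :
    c * (s.length : Int) ≤ (s.map (fun x => x.1)).sum := by
  induction s with
  | nil => simp
  | cons x t ih =>
    have hx := h x List.mem_cons_self
    have ht := ih (fun y hy => h y (List.mem_cons_of_mem x hy))
    simp only [List.map_cons, List.sum_cons, List.length_cons]
    push_cast
    nlinarith [ht, hx]

-- the heap loop never breaks when k covers the whole remaining demand
theorem pvLoopC_done : ∀ (s : List (Int × Int)) (k prev : Int),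
    s.Pairwise (fun a b => pvLt a b = true) →
    (s.map (fun x => x.1)).sum ≤ k + prev * (s.length : Int) →
    pvLoopC s k prev (s.length : Int) = -1 := by
  intro s
  induction s with
  | nil => intro k prev _ _; simp [pvLoopC]
  | cons x t ih =>
    rcases x with ⟨t0, i0⟩
    intro k prev hpw htot
    have hle : ∀ y ∈ t, t0 ≤ y.1 := by
      intro y hy
      have := (List.pairwise_cons.mp hpw).1 y hy
      rcases y with ⟨y1, y2⟩
      simp [pvLt] at this
      omega
    have hlb : t0 * ((t.length : Int) + 1) ≤ (((t0, i0) :: t).map (fun x => x.1)).sum := by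
      have := pvSum_lb ((t0, i0) :: t) t0 (by
        intro y hy
        rcases List.mem_cons.mp hy with rfl | hy'
        · simp
        · exact hle y hy')
      simpa [add_comm] using this
    simp only [pvLoopC]
    have hn : ((((t0, i0) :: t).length : Int)) = (t.length : Int) + 1 := by
      rw [List.length_cons]; push_cast; ring
    have hnobrk : ¬ k < (t0 - prev) * (((t0, i0) :: t).length : Int) := by
      rw [hn]
      have hsum : (((t0, i0) :: t).map (fun x => x.1)).sum
          = t0 + (t.map (fun x => x.1)).sum := by simp
      rw [hn] at htot
      nlinarith [hlb, htot]
    rw [if_neg hnobrk]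
    have harith : (((t0, i0) :: t).length : Int) - 1 = (t.length : Int) := by
      rw [List.length_cons]; push_cast; ring
    rw [harith]
    apply ih _ t0 (List.pairwise_cons.mp hpw).2
    have hsum : (((t0, i0) :: t).map (fun x => x.1)).sum
        = t0 + (t.map (fun x => x.1)).sum := by simp
    rw [hn] at htot
    rw [hsum] at htot
    have hexp : (t0 - prev) * (((t0, i0) :: t).length : Int)
        = t0 * ((t.length : Int) + 1) - prev * ((t.length : Int) + 1) := by rw [hn]; ring
    linarith [htot, hexp]

-- the break: result characterised by any threshold v with S(v-1) ≤ budget < S(v)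
theorem pvLoopC_break : ∀ (s : List (Int × Int)) (k prev v : Int),
    s.Pairwise (fun a b => pvLt a b = true) →
    k + prev * (s.length : Int) < pvS s v →
    pvS s (v - 1) ≤ k + prev * (s.length : Int) →
    pvLoopC s k prev (s.length : Int) =
      ((PySem.List.pyGet? (PySem.List.sorted (s.filter (fun x => decide (v ≤ x.1)))
          (fun x => x.2))
        (PySem.Int.mod (k + prev * (s.length : Int) - pvS s (v - 1))
          ((s.filter (fun x => decide (v ≤ x.1))).length : Int))).getD pvD).2 := by
  intro s
  induction s with
  | nil =>
    intro k prev v _ h1 h2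
    exfalso
    simp [pvS] at h1 h2
    omega
  | cons x t ih =>
    rcases x with ⟨t0, i0⟩
    intro k prev v hpw h1 h2
    have hle : ∀ y ∈ t, t0 ≤ y.1 := by
      intro y hy
      have := (List.pairwise_cons.mp hpw).1 y hy
      rcases y with ⟨y1, y2⟩
      simp [pvLt] at this
      omega
    have hn : ((((t0, i0) :: t).length : Int)) = (t.length : Int) + 1 := by
      rw [List.length_cons]; push_cast; ring
    simp only [pvLoopC]
    by_cases hbrk : k < (t0 - prev) * (((t0, i0) :: t).length : Int)
    · -- break now: every time is ≥ v, the filter keeps everything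
      rw [if_pos hbrk]
      have hge : v ≤ t0 := by
        by_contra hlt
        push_neg at hlt
        -- t0 ≤ v - 1, so every min x.1 (v-1) ≥ t0 … gives pvS ≥ t0 * n, contradiction
        have hSlb : t0 * (((t0, i0) :: t).length : Int) ≤ pvS ((t0, i0) :: t) (v - 1) := by
          have := pvSum_lb (((t0, i0) :: t).map (fun x => (min x.1 (v - 1), x.2))) t0 (by
            intro y hy
            rw [List.mem_map] at hy
            obtain ⟨z, hz, rfl⟩ := hy
            rcases List.mem_cons.mp hz with rfl | hz'
            · simp; omega
            · have := hle z hz'; simp; omega)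
          simpa [pvS, List.map_map, Function.comp] using this
        have hmul : (t0 - prev) * (((t0, i0) :: t).length : Int)
            = t0 * (((t0, i0) :: t).length : Int) - prev * (((t0, i0) :: t).length : Int) := by
          ring
        omega
      have hall : ∀ y ∈ (t0, i0) :: t, v ≤ y.1 := by
        intro y hy
        rcases List.mem_cons.mp hy with rfl | hy'
        · simpa using hge
        · have := hle y hy'; omega
      have hfilter : ((t0, i0) :: t).filter (fun x => decide (v ≤ x.1)) = (t0, i0) :: t := by
        rw [List.filter_eq_self]
        intro y hy
        simpa using hall y hy
      have hSv1 : pvS ((t0, i0) :: t) (v - 1) = (v - 1) * (((t0, i0) :: t).length : Int) := by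
        unfold pvS
        have : ((t0, i0) :: t).map (fun x => min x.1 (v - 1))
            = ((t0, i0) :: t).map (fun _ => v - 1) := by
          apply List.map_congr_left
          intro y hy
          have := hall y hy
          omega
        rw [this, List.map_const', List.sum_replicate, nsmul_eq_mul]
        push_cast
        ring
      rw [hfilter, hSv1]
      -- indices agree modulo the length
      have hmod : PySem.Int.mod k (((t0, i0) :: t).length : Int)
          = PySem.Int.mod (k + prev * (((t0, i0) :: t).length : Int)
              - (v - 1) * (((t0, i0) :: t).length : Int)) (((t0, i0) :: t).length : Int) := by
        have hpos : (0 : Int) < (((t0, i0) :: t).length : Int) := by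
          simp
        rw [PySem.Int.mod_eq_emod_of_pos hpos, PySem.Int.mod_eq_emod_of_pos hpos]
        have : k + prev * (((t0, i0) :: t).length : Int)
            - (v - 1) * (((t0, i0) :: t).length : Int)
            = k + (prev - (v - 1)) * (((t0, i0) :: t).length : Int) := by ring
        rw [this, Int.add_mul_emod_self_right]
      rw [← hmod]
    · -- pop: t0 < v, the head leaves both the loop and the filter
      rw [if_neg hbrk]
      push_neg at hbrk
      have hlt0 : t0 < v := by
        by_contra hge
        push_neg at hge
        -- all times ≥ t0 ≥ v ⇒ pvS s v = v * n ≤ t0 * n ≤ k + prev*n, contradicting h1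
        have hSub : pvS ((t0, i0) :: t) v = v * (((t0, i0) :: t).length : Int) := by
          unfold pvS
          have : ((t0, i0) :: t).map (fun x => min x.1 v)
              = ((t0, i0) :: t).map (fun _ => v) := by
            apply List.map_congr_left
            intro y hy
            rcases List.mem_cons.mp hy with rfl | hy'
            · simp; omega
            · have := hle y hy'; simp; omega
          rw [this, List.map_const', List.sum_replicate, nsmul_eq_mul]
          push_cast
          ring
        rw [hSub] at h1
        have hmul : (t0 - prev) * (((t0, i0) :: t).length : Int)
            = t0 * (((t0, i0) :: t).length : Int) - prev * (((t0, i0) :: t).length : Int) := by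
          ring
        have hpos : (0 : Int) < (((t0, i0) :: t).length : Int) := by simp
        nlinarith [hbrk, h1]
      have harith : (((t0, i0) :: t).length : Int) - 1 = (t.length : Int) := by
        rw [List.length_cons]; push_cast; ring
      rw [harith]
      -- new budget equality: k' + t0 * |t| = k + prev * n - t0
      have hbudget : (k - (t0 - prev) * (((t0, i0) :: t).length : Int)) + t0 * (t.length : Int)
          = k + prev * (((t0, i0) :: t).length : Int) - t0 := by
        rw [hn]; ring
      have hSv : pvS ((t0, i0) :: t) v = min t0 v + pvS t v := by simp [pvS]
      have hSv1 : pvS ((t0, i0) :: t) (v - 1) = min t0 (v - 1) + pvS t (v - 1) := by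
        simp [pvS]
      have hmin0 : min t0 v = t0 := by omega
      have hmin1 : min t0 (v - 1) = t0 := by omega
      have hfilter : ((t0, i0) :: t).filter (fun x => decide (v ≤ x.1))
          = t.filter (fun x => decide (v ≤ x.1)) := by
        rw [List.filter_cons_of_neg (by simpa using (by omega : ¬ v ≤ t0))]
      have h1' : (k - (t0 - prev) * (((t0, i0) :: t).length : Int)) + t0 * (t.length : Int)
          < pvS t v := by
        rw [hbudget]
        rw [hSv, hmin0] at h1
        omega
      have h2' : pvS t (v - 1)
          ≤ (k - (t0 - prev) * (((t0, i0) :: t).length : Int)) + t0 * (t.length : Int) := by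
        rw [hbudget]
        rw [hSv1, hmin1] at h2
        omega
      have := ih (k - (t0 - prev) * (((t0, i0) :: t).length : Int)) t0 v
        (List.pairwise_cons.mp hpw).2 h1' h2'
      rw [this, hfilter]
      congr 2
      rw [hbudget, hSv1, hmin1]
      ring_nf

-- pvPairs' first components are the values
theorem pvPairs_map_min (l : List Int) (v : Int) : ∀ (s' : Nat),
    (pvPairs l s').map (fun x => min x.1 v) = l.map (fun t => min t v) := by
  induction l with
  | nil => intro s'; simp [pvPairs]
  | cons a t ih => intro s'; simp [pvPairs, ih]

-- pvSpent is S over the values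
theorem pvSpent_eq_pvS (l : List Int) (v : Int) (s : List (Int × Int))
    (hperm : s.Perm (pvPairs l 0)) : pvSpent l v = pvS s v := by
  unfold pvSpent pvS
  have h1 : (s.map (fun x => min x.1 v)).sum
      = ((pvPairs l 0).map (fun x => min x.1 v)).sum := (hperm.map _).sum_eq
  have h2 := pvPairs_map_min l v
  have h3 : l.map (fun t => if t < v then t else v) = l.map (fun t => min t v) := by
    apply List.map_congr_left
    intro t _
    by_cases h : t < v <;> simp [h] <;> omega
  rw [h3, h1, h2 0]

-- monotonicity of pvSpent
theorem pvSpent_mono (l : List Int) (v w : Int) (h : v ≤ w) : pvSpent l v ≤ pvSpent l w := by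
  unfold pvSpent
  induction l with
  | nil => simp
  | cons a t ih =>
    simp only [List.map_cons, List.sum_cons]
    have : (if a < v then a else v) ≤ (if a < w then a else w) := by
      split_ifs <;> omega
    omega

-- pvSpent at a level below every element
theorem pvSpent_all_above (l : List Int) (v : Int) (h : ∀ t ∈ l, v < t) :
    pvSpent l v = v * (l.length : Int) := by
  unfold pvSpent
  induction l with
  | nil => simp
  | cons a t ih =>
    have ha := h a List.mem_cons_self
    simp only [List.map_cons, List.sum_cons, List.length_cons]
    rw [if_neg (by omega), ih (fun y hy => h y (List.mem_cons_of_mem a hy))]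
    push_cast
    ring

-- pvSpent at the maximum is the total
theorem pvSpent_all_below (l : List Int) (v : Int) (h : ∀ t ∈ l, t ≤ v) :
    pvSpent l v = l.sum := by
  unfold pvSpent
  induction l with
  | nil => simp
  | cons a t ih =>
    have ha := h a List.mem_cons_self
    simp only [List.map_cons, List.sum_cons]
    rw [ih (fun y hy => h y (List.mem_cons_of_mem a hy))]
    split_ifs <;> omega

-- no survivor at level v ⇒ the two spends agree (used to show the survivors are nonempty)
theorem pvSpent_stall (l : List Int) (v : Int) (h : ∀ t ∈ l, t < v) :
    pvSpent l v = pvSpent l (v - 1) := by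
  unfold pvSpent
  induction l with
  | nil => simp
  | cons a t ih =>
    have ha := h a List.mem_cons_self
    simp only [List.map_cons, List.sum_cons]
    rw [ih (fun y hy => h y (List.mem_cons_of_mem a hy))]
    split_ifs <;> omega

-- binary search: result v has spent(v-1) ≤ k < spent(v)
theorem pvBsearch_spec (l : List Int) (k lo hi : Int) :
    lo < hi → pvSpent l lo ≤ k → k < pvSpent l hi →
    pvSpent l (pvBsearch l k lo hi - 1) ≤ k ∧ k < pvSpent l (pvBsearch l k lo hi) := by
  fun_induction pvBsearch l k lo hi with
  | case1 lo hi h mid hgt ih =>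
    intro hlt hlo hhi
    have hmid := pvMid_bounds lo hi h
    exact ih hmid.1 hlo hgt
  | case2 lo hi h mid hgt ih =>
    intro hlt hlo hhi
    have hmid := pvMid_bounds lo hi h
    exact ih hmid.2 (not_lt.mp hgt) hhi
  | case3 lo hi h =>
    intro hlt hlo hhi
    have hhi1 : hi - 1 ≤ lo := by omega
    exact ⟨le_trans (pvSpent_mono l (hi - 1) lo hhi1) hlo, hhi⟩

-- ===== VERDICT (by name: the statement is the Claim_ definition above) =====
theorem solution_spec : Claim_equal_solution := by
  unfold Claim_equal_solution
  intro ft k _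
  simp only [Spec_solution, solution, solution_alt]
  -- name s, the strictly sorted arrangement, and reduce A's side to pvLoopC
  have hR : (List.range ft.length).foldl
      (fun b i => pvHeappush b (ft.getD i 0, (i : Int) + 1)) []
      = (pvPairs ft 0).foldl pvHeappush [] := by
    rw [← pvPairs_range ft, List.foldl_map]
  rw [hR]
  have hPnd : ((pvPairs ft 0).map (fun x => x.2)).Nodup := pvPairs_snd_nodup ft 0
  set s := PySem.List.sorted2 (pvPairs ft 0) (fun x => x.1) (fun x => x.2) with hs
  have hsperm : s.Perm (pvPairs ft 0) := PySem.List.sorted2_perm _ _ _ _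
  have hs_nd : (s.map (fun x => x.2)).Nodup := ((hsperm.map (fun x => x.2)).nodup_iff).mpr hPnd
  have hs_nodup : s.Nodup := (hsperm.nodup_iff).mpr (List.Nodup.of_map (fun x => x.2) hPnd)
  have hs_lt : s.Pairwise (fun a b => pvLt a b = true) :=
    ((pvSorted2_pairwise (pvPairs ft 0)).and hs_nodup).imp
      (fun hab => pvLt_of_le_of_ne hab.1 hab.2)
  have hslen : ((s.length : Int)) = (ft.length : Int) := by
    rw [hsperm.length_eq, pvPairs_length ft 0]
  have hA : pvLoopA ((pvPairs ft 0).foldl pvHeappush []) k 0 (ft.length : Int)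
      = pvLoopC s k 0 (ft.length : Int) :=
    pvSim ((pvPairs ft 0).foldl pvHeappush []).length _ _ k 0 (ft.length : Int) rfl
      (pvBuild_inv (pvPairs ft 0) pvHInvNil)
      ((pvBuild_perm (pvPairs ft 0) []).trans hsperm.symm)
      hs_lt hs_nd
  rw [hA]
  by_cases hnil : ft.length = 0
  · have : ft = [] := List.eq_nil_of_length_eq_zero hnil
    subst this
    simp only [hnil]
    have hsnil : s = [] := List.eq_nil_of_length_eq_zero
      (by rw [hsperm.length_eq]; simp [pvPairs])
    rw [hsnil]
    simp [pvLoopC]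
  · rw [if_neg hnil]
    have hsum : (s.map (fun x => x.1)).sum = ft.sum := by
      rw [(hsperm.map _).sum_eq, pvPairs_map_fst]
    by_cases hdone : k ≥ ft.sum
    · rw [if_pos hdone]
      rw [← hslen]
      apply pvLoopC_done s k 0 hs_lt
      rw [hsum, hslen]
      omega
    · rw [if_neg hdone]
      push_neg at hdone
      -- the food list is nonempty: name its min and max
      obtain ⟨a0, t0, hft⟩ : ∃ a t, ft = a :: t := by
        cases ft with
        | nil => exact absurd rfl hnil
        | cons a t => exact ⟨a, t, rfl⟩
      have hminsome : ∃ mn, PySem.List.min? ft (fun t => t) = some mn := by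
        rw [hft]; exact ⟨_, by rw [PySem.List.min?_id_cons]⟩
      have hmaxsome : ∃ mx, PySem.List.max? ft (fun t => t) = some mx := by
        rw [hft]; exact ⟨_, by rw [PySem.List.max?_id_cons]⟩
      obtain ⟨mn, hmn⟩ := hminsome
      obtain ⟨mx, hmx⟩ := hmaxsome
      have hmn_min : ∀ y ∈ ft, mn ≤ y := PySem.List.min?_isMin hmn
      have hmx_max : ∀ y ∈ ft, y ≤ mx := PySem.List.max?_isMax hmx
      have hmn_mem : mn ∈ ft := PySem.List.min?_mem hmn
      rw [hmn, hmx]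
      simp only [Option.getD_some]
      set lo := min mn (PySem.Int.floordiv k (ft.length : Int)) - 1 with hlo
      set v := pvBsearch ft k lo mx with hv
      have hnpos : (0 : Int) < (ft.length : Int) := by
        have : 0 < ft.length := Nat.pos_of_ne_zero hnil
        exact_mod_cast this
      -- initial bracket
      have hlo_le : pvSpent ft lo ≤ k := by
        have hall : ∀ t ∈ ft, lo < t := by
          intro t ht
          have := hmn_min t ht
          omega
        rw [pvSpent_all_above ft lo hall]
        have hfd : PySem.Int.floordiv k (ft.length : Int) * (ft.length : Int) ≤ k := by
          have := PySem.Int.floordiv_mul_add_mod k (ft.length : Int)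
          have hmodpos : 0 ≤ PySem.Int.mod k (ft.length : Int) := by
            rw [PySem.Int.mod_eq_emod_of_pos hnpos]
            exact Int.emod_nonneg k (by omega)
          omega
        have hlole : lo ≤ PySem.Int.floordiv k (ft.length : Int) := by omega
        nlinarith [hlole, hnpos, hfd]
      have hhi_gt : k < pvSpent ft mx := by
        rw [pvSpent_all_below ft mx hmx_max]
        exact hdone
      have hlohi : lo < mx := by
        have := hmx_max mn hmn_mem
        omega
      obtain ⟨hv1, hv2⟩ := pvBsearch_spec ft k lo mx hlohi hlo_le hhi_gt
      rw [← hv] at hv1 hv2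
      -- survivors are nonempty
      have hsurv : ∃ t ∈ ft, v ≤ t := by
        by_contra hno
        push_neg at hno
        have := pvSpent_stall ft v hno
        omega
      -- apply the break characterisation with prev = 0
      have hSv : pvS s v = pvSpent ft v := (pvSpent_eq_pvS ft v s hsperm).symm
      have hSv1 : pvS s (v - 1) = pvSpent ft (v - 1) := (pvSpent_eq_pvS ft (v - 1) s hsperm).symm
      have hbrk := pvLoopC_break s k 0 v hs_lt
        (by rw [hSv]; simpa using hv2)
        (by rw [hSv1]; simpa using hv1)
      rw [hslen] at hbrk
      rw [hbrk]
      -- reconcile the two presentations of the survivors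
      have hfilt_pairs : (pvPairs ft 0).filter (fun x => decide (v ≤ x.1))
          = ((PySem.List.enumerate ft).filter (fun p => decide (v ≤ p.2))).map
              (fun p => (p.2, p.1 + 1)) := by
        have := pvPairs_enum ft 0
        rw [← (by simpa using this : (PySem.List.enumerate ft).map
            (fun p => (p.2, p.1 + 1)) = pvPairs ft 0)]
        rw [List.filter_map]
        rfl
      have hfperm : (s.filter (fun x => decide (v ≤ x.1))).Perm
          ((pvPairs ft 0).filter (fun x => decide (v ≤ x.1))) := hsperm.filter _
      have hfpw : ((pvPairs ft 0).filter (fun x => decide (v ≤ x.1))).Pairwise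
          (fun a b => a.2 < b.2) := (pvPairs_snd_lt ft 0).sublist (List.filter_sublist)
      have hsorted_eq : PySem.List.sorted (s.filter (fun x => decide (v ≤ x.1)))
          (fun x => x.2) = (pvPairs ft 0).filter (fun x => decide (v ≤ x.1)) :=
        PySem.List.sorted_eq_of_perm_of_pairwise_lt _ _ _ hfperm.symm hfpw
      have hlen_eq : ((s.filter (fun x => decide (v ≤ x.1))).length : Int)
          = (((pvPairs ft 0).filter (fun x => decide (v ≤ x.1))).length : Int) := by
        rw [hfperm.length_eq]
      rw [hsorted_eq, hlen_eq, hfilt_pairs]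
      -- fold the raw binary-search terms on the B side back into lo and v
      simp only [← hlo, ← hv]
      -- final index bookkeeping
      set E := (PySem.List.enumerate ft).filter (fun p => decide (v ≤ p.2)) with hE
      have hElen : 0 < E.length := by
        obtain ⟨t1, ht1mem, ht1ge⟩ := hsurv
        rw [List.mem_iff_getElem] at ht1mem
        obtain ⟨j, hj, rfl⟩ := ht1mem
        have hmemE : ((j : Int), ft[j]) ∈ E := by
          rw [hE, List.mem_filter]
          constructor
          · rw [PySem.List.mem_enumerate_iff]
            exact ⟨j, hj, by simp⟩
          · simpa using ht1ge
        exact List.length_pos_of_mem hmemE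
      have hlenE : ((E.map (fun p => (p.2, p.1 + 1))).length : Int) = (E.length : Int) := by
        simp
      rw [hlenE]
      set idx := PySem.Int.mod (k + 0 * (ft.length : Int) - pvS s (v - 1)) (E.length : Int)
        with hidx
      have hidx' : PySem.Int.mod (k - pvSpent ft (v - 1))
          ((E.map (fun p => p.1 + 1)).length : Int) = idx := by
        rw [hidx, hSv1]
        congr 1
        · ring
        · simp
      have hEpos : (0 : Int) < (E.length : Int) := by exact_mod_cast hElen
      have hidx_range : 0 ≤ idx ∧ idx < (E.length : Int) := by
        rw [hidx, PySem.Int.mod_eq_emod_of_pos hEpos]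
        exact ⟨Int.emod_nonneg _ (by omega), Int.emod_lt_of_pos _ hEpos⟩
      rw [hidx']
      have hidxNat : idx.toNat < E.length := by omega
      have hget1 : PySem.List.pyGet? (E.map (fun p => (p.2, p.1 + 1))) idx
          = some ((E.map (fun p => (p.2, p.1 + 1)))[idx.toNat]'(by simpa using hidxNat)) :=
        PySem.List.pyGet?_eq_some_getElem _ hidx_range.1 (by
          simp only [List.length_map]
          omega)
      have hget2 : PySem.List.pyGetD (E.map (fun p => p.1 + 1)) idx 0
          = (E.map (fun p => p.1 + 1))[idx.toNat]'(by simpa using hidxNat) :=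
        PySem.List.pyGetD_eq_getElem _ _ hidx_range.1 (by
          simp only [List.length_map]
          omega)
      rw [hget1, hget2]
      simp [List.getElem_map]
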